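-- pv_equiv track=rewrite | github.com/mei28/Competitive-programing | ABC-328/G.py | min_cost_to_equalize
-- ===== SOURCE A (Python) =====
-- def min_cost_to_equalize(A, B, C, N):
--     # Initialize the DP array with infinite cost
--     dp = [float("inf")] * (1 << N)
--     dp[0] = 0  # Base case: no elements matched yet
--
--     # Iterate over all the states of the DP
--     for mask in range(1 << N):
--         for i in range(N):
--             # If the ith element of A is not matched yet
--             if not (mask & (1 << i)):
--                 # Calculate the cost to add k to A[i] to match B[i]
--                 cost_to_match_i = abs(A[i] - B[i])
--                 # Update the DP state if this is a lower cost option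
--                 dp[mask | (1 << i)] = min(
--                     dp[mask | (1 << i)], dp[mask] + cost_to_match_i
--                 )
--
--                 for j in range(i + 1, N):
--                     # If the jth element of A is not matched yet
--                     if not (mask & (1 << j)):
--                         # Calculate the cost for splitting at position i and j
--                         cost_for_split = C
--                         # Calculate the cost to match both A[i] and A[j] to B[i] and B[j]
--                         cost_to_match_i_and_j = cost_to_match_i + abs(A[j] - B[j])
--                         # Update the DP state if this is a lower cost option
--                         dp[mask | (1 << i) | (1 << j)] = min(
--                             dp[mask | (1 << i) | (1 << j)],
--                             dp[mask] + cost_for_split + cost_to_match_i_and_j,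
--                         )
--
--     # The final state where all elements are matched is 2^N - 1
--     final_state = (1 << N) - 1
--     return dp[final_state]
-- ===== SOURCE B (Python) =====
-- def min_cost_to_equalize(A, B, C, N):
--     # Closed form: every element must be moved to its target (cost |A[i]-B[i]|),
--     # and a pair operation adds C; pairing helps iff C < 0, then pair floor(N/2) times.
--     total = 0
--     for i in range(N):
--         total += abs(A[i] - B[i])
--     return total + min(0, C) * (N // 2)
-- ===== Notes on version B (the rewrite author's own statement) =====
-- stated objective: faster
-- what changed: Replaced the O(2^N * N^2) bitmask DP over all subsets with an O(N) closed form (sum of |A[i]-B[i]| plus min(0,C) times floor(N/2), since a pair operation only adds C and pairing pays off exactly when C < 0); intended as asymptotically faster: a timing run could not measure a ratio because exponential A already times out at small N (n=64..256) where B returns instantly.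
import Mathlib
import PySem

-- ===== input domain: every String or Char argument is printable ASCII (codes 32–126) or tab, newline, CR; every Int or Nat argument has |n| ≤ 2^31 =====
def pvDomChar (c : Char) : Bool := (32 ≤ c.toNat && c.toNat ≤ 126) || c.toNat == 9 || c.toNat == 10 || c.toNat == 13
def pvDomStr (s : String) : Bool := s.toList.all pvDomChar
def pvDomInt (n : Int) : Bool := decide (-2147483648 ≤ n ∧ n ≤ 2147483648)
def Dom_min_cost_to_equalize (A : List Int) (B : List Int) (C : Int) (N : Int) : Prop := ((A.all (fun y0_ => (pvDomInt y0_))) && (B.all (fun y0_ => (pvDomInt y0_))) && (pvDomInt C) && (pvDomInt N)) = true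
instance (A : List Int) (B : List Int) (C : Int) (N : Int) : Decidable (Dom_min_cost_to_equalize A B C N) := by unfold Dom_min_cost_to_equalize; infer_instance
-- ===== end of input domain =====

-- B replaces A's O(2^N·N^2) bitmask DP by the O(N) closed form Σ|A[i]-B[i]| + min(0,C)·(N//2).

-- ===== PORT A =====
-- The Python dp list of length 2^N (floats, initialised to float("inf")) is ported as a
-- total map `Nat → Option Int` with `none` = float inf; min / + on inf become pvOmin / pvOadd.
def pvOmin : Option Int → Option Int → Option Int
  | none, y => y
  | some a, none => some a
  | some a, some b => some (min a b)

def pvOadd (o : Option Int) (c : Int) : Option Int := o.map (fun w => w + c)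

-- abs(A[i] - B[i]); indices stay in range under Pre_
def pvCost (A B : List Int) (i : Nat) : Int :=
  |PySem.List.pyGetD A (i : Int) 0 - PySem.List.pyGetD B (i : Int) 0|

-- inner loop body: for j in range(i+1, N)
def pvPairBody (A B : List Int) (C : Int) (mask i : Nat) (dp : List (Option Int)) (j : Nat) :
    List (Option Int) :=
  if mask.testBit j then dp
  else dp.set (mask ||| 1 <<< i ||| 1 <<< j)
        (pvOmin (dp.getD (mask ||| 1 <<< i ||| 1 <<< j) none)
                (pvOadd (dp.getD mask none) (C + (pvCost A B i + pvCost A B j))))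

-- loop body: for i in range(N)
def pvBody (A B : List Int) (C : Int) (n mask : Nat) (dp : List (Option Int)) (i : Nat) :
    List (Option Int) :=
  if mask.testBit i then dp
  else
    (List.range' (i + 1) (n - (i + 1))).foldl (pvPairBody A B C mask i)
      (dp.set (mask ||| 1 <<< i)
        (pvOmin (dp.getD (mask ||| 1 <<< i) none) (pvOadd (dp.getD mask none) (pvCost A B i))))

def min_cost_to_equalize (A : List Int) (B : List Int) (C : Int) (N : Int) : Int :=
  -- dp = [inf]*(1<<N); dp[0] = 0; then the two nested loops; finally return dp[(1<<N)-1]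
  -- (under Pre_ dp[final] is always a finite int, so the final getD 0 never fires)
  (((List.range (2 ^ N.toNat)).foldl
      (fun dp mask => (List.range N.toNat).foldl (pvBody A B C N.toNat mask) dp)
      ((List.replicate (2 ^ N.toNat) (none : Option Int)).set 0 (some 0))).getD
    (2 ^ N.toNat - 1) none).getD 0

-- ===== PORT B =====
def min_cost_to_equalize_alt (A : List Int) (B : List Int) (C : Int) (N : Int) : Int :=
  (List.range N.toNat).foldl
      (fun (s : Int) (i : Nat) => s + |PySem.List.pyGetD A (i : Int) 0 - PySem.List.pyGetD B (i : Int) 0|) 0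
    + min 0 C * PySem.Int.floordiv N 2

-- ===== PRECONDITION & SPEC =====
-- Exactly where the Python A returns: N < 0 makes `1 << N` raise ValueError, and
-- N > len(A) or N > len(B) makes A[i]/B[i] raise IndexError.
def Pre_min_cost_to_equalize (A : List Int) (B : List Int) (C : Int) (N : Int) : Prop :=
  0 ≤ N ∧ N ≤ (A.length : Int) ∧ N ≤ (B.length : Int)
instance (A : List Int) (B : List Int) (C : Int) (N : Int) : Decidable (Pre_min_cost_to_equalize A B C N) := by unfold Pre_min_cost_to_equalize; infer_instance

def pvWitness_min_cost_to_equalize : List Int × List Int × Int × Int := ([1, 2], [2, 4], -1, 2)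

def Spec_min_cost_to_equalize (A : List Int) (B : List Int) (C : Int) (N : Int) (out : Int) : Prop := out = min_cost_to_equalize_alt A B C N
instance (A : List Int) (B : List Int) (C : Int) (N : Int) (out : Int) : Decidable (Spec_min_cost_to_equalize A B C N out) := by unfold Spec_min_cost_to_equalize; infer_instance

-- ===== CLAIM (what is proved, stated in full; the proofs are below) =====
def Claim_equal_min_cost_to_equalize : Prop := ∀ (A : List Int) (B : List Int) (C : Int) (N : Int), Dom_min_cost_to_equalize A B C N → Pre_min_cost_to_equalize A B C N → Spec_min_cost_to_equalize A B C N (min_cost_to_equalize A B C N)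

-- ===== LEMMAS AND PROOFS =====

-- The exact value of the DP: g(mask) = Σ_{i ∈ mask} |A i - B i| + min 0 C * (popcount mask / 2).
def pvS (n mask : Nat) : Finset Nat := (Finset.range n).filter (fun j => mask.testBit j)

def pvG (A B : List Int) (C : Int) (n mask : Nat) : Int :=
  (∑ j ∈ pvS n mask, pvCost A B j) + min 0 C * (((pvS n mask).card / 2 : Nat) : Int)

-- order on Option Int with none = +inf
def pvOLE (o1 o2 : Option Int) : Prop := ∀ v, o2 = some v → ∃ w, o1 = some w ∧ w ≤ v
def pvPLE (d1 d2 : Nat → Option Int) : Prop := ∀ t, pvOLE (d1 t) (d2 t)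
def pvUB (o : Option Int) (v : Int) : Prop := ∃ w, o = some w ∧ w ≤ v
def pvLB (A B : List Int) (C : Int) (n : Nat) (dp : Nat → Option Int) : Prop :=
  ∀ t w, dp t = some w → pvG A B C n t ≤ w

def pvPushed (A B : List Int) (C : Int) (n : Nat) (dp : Nat → Option Int) (p : Nat) : Prop :=
  (∀ i, i < n → p.testBit i = false → pvUB (dp (p ||| 1 <<< i)) (pvG A B C n p + pvCost A B i)) ∧
  (∀ i j, i < j → j < n → p.testBit i = false → p.testBit j = false →
    pvUB (dp (p ||| 1 <<< i ||| 1 <<< j)) (pvG A B C n p + (C + (pvCost A B i + pvCost A B j))))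

def pvInv (A B : List Int) (C : Int) (n m : Nat) (dp : Nat → Option Int) : Prop :=
  dp 0 = some 0 ∧ pvLB A B C n dp ∧ ∀ p, p < m → pvPushed A B C n dp p

-- function views of the loop bodies (the list dp viewed as a total map Nat → Option Int)
def pvUpd (dp : Nat → Option Int) (k : Nat) (v : Option Int) : Nat → Option Int :=
  fun t => if t = k then v else dp t

def pvPairBodyF (A B : List Int) (C : Int) (mask i : Nat) (dp : Nat → Option Int) (j : Nat) :
    Nat → Option Int :=
  if mask.testBit j then dp
  else pvUpd dp (mask ||| 1 <<< i ||| 1 <<< j)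
        (pvOmin (dp (mask ||| 1 <<< i ||| 1 <<< j))
                (pvOadd (dp mask) (C + (pvCost A B i + pvCost A B j))))

def pvBodyF (A B : List Int) (C : Int) (n mask : Nat) (dp : Nat → Option Int) (i : Nat) :
    Nat → Option Int :=
  if mask.testBit i then dp
  else
    (List.range' (i + 1) (n - (i + 1))).foldl (pvPairBodyF A B C mask i)
      (pvUpd dp (mask ||| 1 <<< i) (pvOmin (dp (mask ||| 1 <<< i)) (pvOadd (dp mask) (pvCost A B i))))

-- ---- basic order lemmas ----
lemma pvOLE_refl (o : Option Int) : pvOLE o o := by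
  intro v hv; exact ⟨v, hv, le_refl v⟩

lemma pvOLE_trans {a b c : Option Int} (h1 : pvOLE a b) (h2 : pvOLE b c) : pvOLE a c := by
  intro v hv
  obtain ⟨w, hw, hwv⟩ := h2 v hv
  obtain ⟨u, hu, huw⟩ := h1 w hw
  exact ⟨u, hu, le_trans huw hwv⟩

lemma pvPLE_refl (d : Nat → Option Int) : pvPLE d d := fun t => pvOLE_refl _

lemma pvPLE_trans {a b c : Nat → Option Int} (h1 : pvPLE a b) (h2 : pvPLE b c) : pvPLE a c :=
  fun t => pvOLE_trans (h1 t) (h2 t)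

lemma pvOLE_omin_left (o c : Option Int) : pvOLE (pvOmin o c) o := by
  intro v hv
  cases o with
  | none => cases hv
  | some a =>
    cases c with
    | none => exact ⟨v, hv, le_refl v⟩
    | some b =>
      have hva : a = v := by injection hv
      exact ⟨min a b, rfl, hva ▸ min_le_left a b⟩

lemma pvUB_omin_right {o : Option Int} {b v : Int} (h : b ≤ v) : pvUB (pvOmin o (some b)) v := by
  cases o with
  | none => exact ⟨b, rfl, h⟩
  | some a => exact ⟨min a b, rfl, le_trans (min_le_right a b) h⟩

lemma pvUB_of_PLE {d1 d2 : Nat → Option Int} {t : Nat} {v : Int}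
    (hle : pvPLE d1 d2) (h : pvUB (d2 t) v) : pvUB (d1 t) v := by
  obtain ⟨w, hw, hwv⟩ := h
  obtain ⟨u, hu, huw⟩ := hle t w hw
  exact ⟨u, hu, le_trans huw hwv⟩

lemma pvPLE_upd_min (dp : Nat → Option Int) (k : Nat) (c : Option Int) :
    pvPLE (pvUpd dp k (pvOmin (dp k) c)) dp := by
  intro t
  unfold pvUpd
  by_cases h : t = k
  · subst h; simp only [if_pos rfl]; exact pvOLE_omin_left _ _
  · simp only [if_neg h]; exact pvOLE_refl _

-- ---- generic foldl lemmas ----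
lemma pvFoldl_ple {α : Type} (f : (Nat → Option Int) → α → (Nat → Option Int))
    (h : ∀ dp x, pvPLE (f dp x) dp) :
    ∀ (l : List α) (dp : Nat → Option Int), pvPLE (l.foldl f dp) dp := by
  intro l
  induction l with
  | nil => intro dp; exact pvPLE_refl dp
  | cons x xs ih =>
    intro dp
    exact pvPLE_trans (ih (f dp x)) (h dp x)

lemma pvFoldl_pres {α : Type} {P : (Nat → Option Int) → Prop}
    (f : (Nat → Option Int) → α → (Nat → Option Int)) :
    ∀ (l : List α) (dp : Nat → Option Int),
      (∀ dp x, x ∈ l → P dp → P (f dp x)) → P dp → P (l.foldl f dp) := by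
  intro l
  induction l with
  | nil => intro dp _ h; exact h
  | cons x xs ih =>
    intro dp hstep h
    exact ih (f dp x) (fun dp' y hy => hstep dp' y (List.mem_cons_of_mem x hy))
      (hstep dp x (by simp) h)

lemma pvFoldl_estab {α : Type} (f : (Nat → Option Int) → α → (Nat → Option Int))
    {I : (Nat → Option Int) → Prop} {P : α → (Nat → Option Int) → Prop}
    (hmono : ∀ dp x, pvPLE (f dp x) dp)
    (hdc : ∀ x d1 d2, pvPLE d1 d2 → P x d2 → P x d1) :
    ∀ (l : List α) (dp : Nat → Option Int),
      (∀ dp x, x ∈ l → I dp → I (f dp x)) →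
      (∀ dp x, x ∈ l → I dp → P x (f dp x)) →
      I dp → ∀ x ∈ l, P x (l.foldl f dp) := by
  intro l
  induction l with
  | nil => intro dp _ _ _ x hx; cases hx
  | cons y ys ih =>
    intro dp hI hest hIdp x hx
    rcases List.mem_cons.mp hx with h | h
    · subst h
      have h1 : P x (f dp x) := hest dp x (by simp) hIdp
      exact hdc x _ _ (pvFoldl_ple f hmono ys (f dp x)) h1
    · exact ih (f dp y)
        (fun d z hz => hI d z (List.mem_cons_of_mem y hz))
        (fun d z hz => hest d z (List.mem_cons_of_mem y hz))
        (hI dp y (by simp) hIdp) x h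

-- ---- bit lemmas ----
lemma pvTestBit_or_pow (mask i j : Nat) :
    (mask ||| 1 <<< i).testBit j = (mask.testBit j || decide (i = j)) := by
  rw [Nat.one_shiftLeft, Nat.testBit_or, Nat.testBit_two_pow]

lemma pvTgt_ne_mask {mask i : Nat} (h : mask.testBit i = false) : mask ||| 1 <<< i ≠ mask := by
  intro hEq
  have : (mask ||| 1 <<< i).testBit i = mask.testBit i := by rw [hEq]
  rw [pvTestBit_or_pow, h] at this
  simp at this

lemma pvTgt_ne_zero (mask i : Nat) : mask ||| 1 <<< i ≠ 0 := by
  intro hEq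
  have : (mask ||| 1 <<< i).testBit i = (0 : Nat).testBit i := by rw [hEq]
  rw [pvTestBit_or_pow] at this
  simp at this

lemma pvTgt2_ne_mask {mask i : Nat} (j : Nat) (h : mask.testBit i = false) :
    mask ||| 1 <<< i ||| 1 <<< j ≠ mask := by
  intro hEq
  have : (mask ||| 1 <<< i ||| 1 <<< j).testBit i = mask.testBit i := by rw [hEq]
  rw [pvTestBit_or_pow, pvTestBit_or_pow, h] at this
  simp at this

lemma pvTgt2_ne_zero (mask i j : Nat) : mask ||| 1 <<< i ||| 1 <<< j ≠ 0 := by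
  intro hEq
  have : (mask ||| 1 <<< i ||| 1 <<< j).testBit j = (0 : Nat).testBit j := by rw [hEq]
  rw [pvTestBit_or_pow] at this
  simp at this

lemma pvS_or {n mask i : Nat} (hi : i < n) (hm : mask.testBit i = false) :
    pvS n (mask ||| 1 <<< i) = insert i (pvS n mask) := by
  unfold pvS
  ext j
  simp only [Finset.mem_insert, Finset.mem_filter, Finset.mem_range, pvTestBit_or_pow]
  by_cases h : i = j
  · subst h; simp [hi]
  · simp [h]
    tauto

lemma pvNotMem_pvS {n mask i : Nat} (hm : mask.testBit i = false) : i ∉ pvS n mask := by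
  unfold pvS
  simp [hm]

lemma pvMem_pvS {n mask i : Nat} (hi : i < n) (hm : mask.testBit i = true) : i ∈ pvS n mask := by
  unfold pvS
  simp [hi, hm]

-- unfolding g after inserting one fresh bit
lemma pvG_or {A B : List Int} {C : Int} {n mask i : Nat} (hi : i < n) (hm : mask.testBit i = false) :
    pvG A B C n (mask ||| 1 <<< i) =
      (∑ j ∈ pvS n mask, pvCost A B j) + pvCost A B i
        + min 0 C * ((((pvS n mask).card + 1) / 2 : Nat) : Int) := by
  unfold pvG
  rw [pvS_or hi hm, Finset.sum_insert (pvNotMem_pvS hm), Finset.card_insert_of_notMem (pvNotMem_pvS hm)]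
  ring

lemma pvHalf_mono (q1 q2 : Nat) (h : q1 ≤ q2) (M : Int) (hM : M ≤ 0) :
    M * (q2 : Int) ≤ M * (q1 : Int) := by
  have : (q1 : Int) ≤ (q2 : Int) := by exact_mod_cast h
  exact mul_le_mul_of_nonpos_left this hM

-- g satisfies the ≤ direction of the DP recurrence (single move)
lemma pvG_R1 {A B : List Int} {C : Int} {n mask i : Nat} (hi : i < n) (hm : mask.testBit i = false) :
    pvG A B C n (mask ||| 1 <<< i) ≤ pvG A B C n mask + pvCost A B i := by
  rw [pvG_or hi hm]
  unfold pvG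
  have h1 : min 0 C * ((((pvS n mask).card + 1) / 2 : Nat) : Int)
      ≤ min 0 C * (((pvS n mask).card / 2 : Nat) : Int) :=
    pvHalf_mono _ _ (by omega) _ (min_le_left 0 C)
  linarith

-- g satisfies the ≤ direction of the DP recurrence (pair move)
lemma pvG_R2 {A B : List Int} {C : Int} {n mask i j : Nat} (hij : i < j) (hj : j < n)
    (hmi : mask.testBit i = false) (hmj : mask.testBit j = false) :
    pvG A B C n (mask ||| 1 <<< i ||| 1 <<< j)
      ≤ pvG A B C n mask + (C + (pvCost A B i + pvCost A B j)) := by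
  have hi : i < n := lt_trans hij hj
  have hmj' : (mask ||| 1 <<< i).testBit j = false := by
    rw [pvTestBit_or_pow, hmj]
    simp [Nat.ne_of_lt hij]
  have hji : j ∉ pvS n (mask ||| 1 <<< i) := pvNotMem_pvS hmj'
  have hii : i ∉ pvS n mask := pvNotMem_pvS hmi
  unfold pvG
  rw [pvS_or hj hmj', pvS_or hi hmi,
    Finset.sum_insert (by rw [pvS_or hi hmi] at hji; exact hji),
    Finset.sum_insert hii,
    Finset.card_insert_of_notMem (by rw [pvS_or hi hmi] at hji; exact hji),
    Finset.card_insert_of_notMem hii]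
  have hcard : (((pvS n mask).card + 1 + 1) / 2 : Nat) = (pvS n mask).card / 2 + 1 := by omega
  rw [hcard]
  push_cast
  have hM0 : min 0 C ≤ 0 := min_le_left 0 C
  have hMC : min 0 C ≤ C := min_le_right 0 C
  nlinarith [hM0, hMC]

-- clearing a set bit
lemma pvClear_spec {mask i : Nat} (h : mask.testBit i = true) :
    (mask ^^^ 1 <<< i).testBit i = false ∧
    (∀ j, j ≠ i → (mask ^^^ 1 <<< i).testBit j = mask.testBit j) ∧
    (mask ^^^ 1 <<< i) ||| 1 <<< i = mask ∧ mask ^^^ 1 <<< i < mask := by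
  have htb : ∀ j, (mask ^^^ 1 <<< i).testBit j = ((mask.testBit j).xor (decide (i = j))) := by
    intro j
    rw [Nat.one_shiftLeft, Nat.testBit_xor, Nat.testBit_two_pow]
  have h1 : (mask ^^^ 1 <<< i).testBit i = false := by rw [htb]; simp [h]
  have h2 : ∀ j, j ≠ i → (mask ^^^ 1 <<< i).testBit j = mask.testBit j := by
    intro j hj
    rw [htb]
    have : (decide (i = j)) = false := by
      simp only [decide_eq_false_iff_not]
      exact fun hij => hj hij.symm
    rw [this, Bool.xor_false]
  refine ⟨h1, h2, ?_, ?_⟩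
  · apply Nat.eq_of_testBit_eq
    intro j
    rw [pvTestBit_or_pow]
    by_cases hji : j = i
    · subst hji
      simp [h1, h]
    · rw [h2 j hji]
      have : (decide (i = j)) = false := by
        simp only [decide_eq_false_iff_not]
        exact fun hij => hji hij.symm
      rw [this, Bool.or_false]
  · exact Nat.lt_of_testBit i h1 h (fun j hj => h2 j (Nat.ne_of_gt hj))

-- every set bit of mask < 2^n is < n
lemma pvBit_lt {n mask i : Nat} (hlt : mask < 2 ^ n) (h : mask.testBit i = true) : i < n := by
  by_contra hni
  have : mask < 2 ^ i := lt_of_lt_of_le hlt (Nat.pow_le_pow_right (by norm_num) (by omega))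
  rw [Nat.testBit_lt_two_pow this] at h
  cases h

-- g 0 = 0
lemma pvG_zero (A B : List Int) (C : Int) (n : Nat) : pvG A B C n 0 = 0 := by
  unfold pvG pvS
  simp

-- existence of an optimal predecessor move
lemma pvExists_pred (A B : List Int) (C : Int) (n mask : Nat) (h0 : mask ≠ 0) (hlt : mask < 2 ^ n) :
    (∃ i, i < n ∧ ∃ p, p.testBit i = false ∧ p ||| 1 <<< i = mask ∧ p < mask ∧
        pvG A B C n p + pvCost A B i = pvG A B C n mask) ∨
    (∃ i j, i < j ∧ j < n ∧ ∃ p, p.testBit i = false ∧ p.testBit j = false ∧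
        p ||| 1 <<< i ||| 1 <<< j = mask ∧ p < mask ∧
        pvG A B C n p + (C + (pvCost A B i + pvCost A B j)) = pvG A B C n mask) := by
  have hS : (pvS n mask).Nonempty := by
    obtain ⟨i, hi, -⟩ := Nat.exists_most_significant_bit h0
    exact ⟨i, pvMem_pvS (pvBit_lt hlt hi) hi⟩
  by_cases hcase : 0 ≤ C ∨ (pvS n mask).card % 2 = 1
  · left
    obtain ⟨i, hiS⟩ := hS
    obtain ⟨hi, hbit⟩ : i < n ∧ mask.testBit i = true := by
      unfold pvS at hiS
      simpa using hiS
    obtain ⟨hp1, _, hor, hplt⟩ := pvClear_spec hbit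
    refine ⟨i, hi, mask ^^^ 1 <<< i, hp1, hor, hplt, ?_⟩
    have hins : pvS n mask = insert i (pvS n (mask ^^^ 1 <<< i)) := by
      conv_lhs => rw [← hor]
      exact pvS_or hi hp1
    have hik : i ∉ pvS n (mask ^^^ 1 <<< i) := pvNotMem_pvS hp1
    have hcard : (pvS n mask).card = (pvS n (mask ^^^ 1 <<< i)).card + 1 := by
      rw [hins, Finset.card_insert_of_notMem hik]
    have hhalf : min 0 C * ((((pvS n (mask ^^^ 1 <<< i)).card) / 2 : Nat) : Int)
        = min 0 C * ((((pvS n (mask ^^^ 1 <<< i)).card + 1) / 2 : Nat) : Int) := by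
      rcases hcase with hC | hodd
      · rw [min_eq_left hC]
        ring
      · have heq : (((pvS n (mask ^^^ 1 <<< i)).card + 1) / 2 : Nat)
            = ((pvS n (mask ^^^ 1 <<< i)).card / 2 : Nat) := by omega
        rw [heq]
    unfold pvG
    rw [hins, Finset.sum_insert hik, Finset.card_insert_of_notMem hik, hhalf]
    ring
  · right
    have hC : C < 0 := by
      by_contra h
      exact hcase (Or.inl (by omega))
    have heven : (pvS n mask).card % 2 ≠ 1 := fun h => hcase (Or.inr h)
    have hMC : min 0 C = C := min_eq_right (le_of_lt hC)
    have hge2 : 1 < (pvS n mask).card := by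
      have := Finset.card_pos.mpr hS
      omega
    obtain ⟨a, haS, b, hbS, hab⟩ := Finset.one_lt_card.mp hge2
    -- order the two distinct set bits
    obtain ⟨i, j, hij, hiS', hjS'⟩ : ∃ i j, i < j ∧ i ∈ pvS n mask ∧ j ∈ pvS n mask := by
      rcases Nat.lt_or_ge a b with h | h
      · exact ⟨a, b, h, haS, hbS⟩
      · exact ⟨b, a, by omega, hbS, haS⟩
    obtain ⟨hi, hbi⟩ : i < n ∧ mask.testBit i = true := by unfold pvS at hiS'; simpa using hiS'
    obtain ⟨hj, hbj⟩ : j < n ∧ mask.testBit j = true := by unfold pvS at hjS'; simpa using hjS'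
    obtain ⟨hm1j, hm1keep, hm1or, hm1lt⟩ := pvClear_spec hbj
    have hm1i : (mask ^^^ 1 <<< j).testBit i = true := by
      rw [hm1keep i (Nat.ne_of_lt hij)]; exact hbi
    obtain ⟨hp_i, hpkeep, hpor, hplt⟩ := pvClear_spec hm1i
    have hp_j : (mask ^^^ 1 <<< j ^^^ 1 <<< i).testBit j = false := by
      rw [hpkeep j (Nat.ne_of_gt hij)]; exact hm1j
    refine ⟨i, j, hij, hj, mask ^^^ 1 <<< j ^^^ 1 <<< i, hp_i, hp_j, ?_, ?_, ?_⟩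
    · rw [hpor, hm1or]
    · omega
    · -- value equality
      have hins1 : pvS n (mask ^^^ 1 <<< j) = insert i (pvS n (mask ^^^ 1 <<< j ^^^ 1 <<< i)) := by
        conv_lhs => rw [← hpor]
        exact pvS_or hi hp_i
      have hins2 : pvS n mask = insert j (pvS n (mask ^^^ 1 <<< j)) := by
        conv_lhs => rw [← hm1or]
        exact pvS_or hj hm1j
      have hik : i ∉ pvS n (mask ^^^ 1 <<< j ^^^ 1 <<< i) := pvNotMem_pvS hp_i
      have hjk : j ∉ pvS n (mask ^^^ 1 <<< j) := pvNotMem_pvS hm1j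
      unfold pvG
      rw [hins2, Finset.sum_insert hjk, Finset.card_insert_of_notMem hjk,
        hins1, Finset.sum_insert hik, Finset.card_insert_of_notMem hik]
      have hhalf : ((((pvS n (mask ^^^ 1 <<< j ^^^ 1 <<< i)).card + 1 + 1) / 2 : Nat) : Int)
          = (((pvS n (mask ^^^ 1 <<< j ^^^ 1 <<< i)).card / 2 : Nat) : Int) + 1 := by
        have : (((pvS n (mask ^^^ 1 <<< j ^^^ 1 <<< i)).card + 1 + 1) / 2 : Nat)
            = ((pvS n (mask ^^^ 1 <<< j ^^^ 1 <<< i)).card / 2 : Nat) + 1 := by omega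
        rw [this]
        push_cast
        ring
      rw [hhalf, hMC]
      ring

lemma pvDp_eq_of_inv {A B : List Int} {C : Int} {n m : Nat} {dp : Nat → Option Int}
    (hinv : pvInv A B C n m dp) (mask : Nat) (hlt : mask < 2 ^ n) (hle : mask ≤ m) :
    dp mask = some (pvG A B C n mask) := by
  obtain ⟨h0, hLB, hP⟩ := hinv
  by_cases hz : mask = 0
  · subst hz
    rw [h0, pvG_zero]
  · have hub : pvUB (dp mask) (pvG A B C n mask) := by
      rcases pvExists_pred A B C n mask hz hlt with
        ⟨i, hin, p, hpi, hpor, hplt, hgeq⟩ | ⟨i, j, hij, hjn, p, hpi, hpj, hpor, hplt, hgeq⟩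
      · have h := (hP p (by omega)).1 i hin hpi
        rw [hpor, hgeq] at h
        exact h
      · have h := (hP p (by omega)).2 i j hij hjn hpi hpj
        rw [hpor, hgeq] at h
        exact h
    obtain ⟨w, hw, hwle⟩ := hub
    have hlb := hLB mask w hw
    rw [hw]
    congr 1
    omega

-- lower bound is preserved by one candidate update
lemma pvCand_LB {A B : List Int} {C : Int} {n : Nat} {dp : Nat → Option Int}
    (hLB : pvLB A B C n dp) {src tgt : Nat} {c : Int}
    (hrec : pvG A B C n tgt ≤ pvG A B C n src + c) :
    ∀ w, pvOmin (dp tgt) (pvOadd (dp src) c) = some w → pvG A B C n tgt ≤ w := by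
  intro w hw
  cases htgt : dp tgt with
  | none =>
    cases hsrc : dp src with
    | none => rw [htgt, hsrc] at hw; cases hw
    | some u =>
      rw [htgt, hsrc] at hw
      have : u + c = w := by
        simpa [pvOmin, pvOadd] using hw
      have := hLB src u hsrc
      omega
  | some a =>
    cases hsrc : dp src with
    | none =>
      rw [htgt, hsrc] at hw
      have : a = w := by simpa [pvOmin, pvOadd] using hw
      have := hLB tgt a htgt
      omega
    | some u =>
      rw [htgt, hsrc] at hw
      have hmin : min a (u + c) = w := by simpa [pvOmin, pvOadd] using hw
      have h1 := hLB tgt a htgt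
      have h2 := hLB src u hsrc
      omega

lemma pvLB_upd {A B : List Int} {C : Int} {n : Nat} {dp : Nat → Option Int} {t : Nat}
    (hLB : pvLB A B C n dp) (o : Option Int)
    (ho : ∀ w, o = some w → pvG A B C n t ≤ w) : pvLB A B C n (pvUpd dp t o) := by
  intro t' w hw
  unfold pvUpd at hw
  by_cases h : t' = t
  · subst h
    rw [if_pos rfl] at hw
    exact ho w hw
  · rw [if_neg h] at hw
    exact hLB t' w hw

lemma pvUpd_apply_ne {dp : Nat → Option Int} {k t : Nat} (v : Option Int) (h : t ≠ k) :
    pvUpd dp k v t = dp t := by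
  unfold pvUpd
  rw [if_neg h]

lemma pvUpd_apply_self (dp : Nat → Option Int) (k : Nat) (v : Option Int) :
    pvUpd dp k v k = v := by
  unfold pvUpd
  rw [if_pos rfl]

lemma pvPairBodyF_mono (A B : List Int) (C : Int) (mask i : Nat) :
    ∀ (dp : Nat → Option Int) (j : Nat), pvPLE (pvPairBodyF A B C mask i dp j) dp := by
  intro dp j
  unfold pvPairBodyF
  split
  · exact pvPLE_refl dp
  · exact pvPLE_upd_min dp _ _

lemma pvBodyF_mono (A B : List Int) (C : Int) (n mask : Nat) :
    ∀ (dp : Nat → Option Int) (i : Nat), pvPLE (pvBodyF A B C n mask dp i) dp := by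
  intro dp i
  unfold pvBodyF
  split
  · exact pvPLE_refl dp
  · exact pvPLE_trans
      (pvFoldl_ple _ (pvPairBodyF_mono A B C mask i) _ _)
      (pvPLE_upd_min dp _ _)

-- values at 0 and at mask itself are never touched by the two inner loops
lemma pvPairBodyF_keep {A B : List Int} {C : Int} {mask i : Nat} (hi : mask.testBit i = false)
    (dp : Nat → Option Int) (j t : Nat) (ht : t = 0 ∨ t = mask) :
    pvPairBodyF A B C mask i dp j t = dp t := by
  unfold pvPairBodyF
  split
  · rfl
  · rcases ht with h | h <;> subst h
    · exact pvUpd_apply_ne _ (Ne.symm (pvTgt2_ne_zero mask i j))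
    · exact pvUpd_apply_ne _ (Ne.symm (pvTgt2_ne_mask j hi))

lemma pvBodyF_keep {A B : List Int} {C : Int} {n mask : Nat}
    (dp : Nat → Option Int) (i t : Nat) (ht : t = 0 ∨ t = mask) :
    pvBodyF A B C n mask dp i t = dp t := by
  unfold pvBodyF
  split
  · rfl
  · next hbit =>
    have hbit' : mask.testBit i = false := by
      simpa using hbit
    have hupd : pvUpd dp (mask ||| 1 <<< i)
        (pvOmin (dp (mask ||| 1 <<< i)) (pvOadd (dp mask) (pvCost A B i))) t = dp t := by
      rcases ht with h | h <;> subst h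
      · exact pvUpd_apply_ne _ (Ne.symm (pvTgt_ne_zero mask i))
      · exact pvUpd_apply_ne _ (Ne.symm (pvTgt_ne_mask hbit'))
    have := pvFoldl_pres (P := fun d => d t = dp t) (pvPairBodyF A B C mask i)
      (List.range' (i + 1) (n - (i + 1))) _
      (fun d j _ hd => by
        show pvPairBodyF A B C mask i d j t = dp t
        rw [pvPairBodyF_keep hbit' d j t ht]; exact hd) hupd
    exact this

-- the inner double loop for one mask preserves the invariant and completes the pushes for mask
lemma pvStep {A B : List Int} {C : Int} {n m : Nat} {dp : Nat → Option Int}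
    (hm : m < 2 ^ n) (hinv : pvInv A B C n m dp) :
    pvInv A B C n (m + 1) ((List.range n).foldl (pvBodyF A B C n m) dp) := by
  have hdm : dp m = some (pvG A B C n m) := pvDp_eq_of_inv hinv m hm (le_refl m)
  obtain ⟨h0, hLB, hPush⟩ := hinv
  -- dp 0 and dp m are untouched
  have hkeep : ∀ t, t = 0 ∨ t = m →
      ((List.range n).foldl (pvBodyF A B C n m) dp) t = dp t := by
    intro t ht
    exact pvFoldl_pres (P := fun d => d t = dp t) (pvBodyF A B C n m) (List.range n) dp
      (fun d i _ hd => by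
        show pvBodyF A B C n m d i t = dp t
        rw [pvBodyF_keep d i t ht]; exact hd) rfl
  -- lower bound preserved
  have hLB' : pvLB A B C n ((List.range n).foldl (pvBodyF A B C n m) dp) := by
    refine pvFoldl_pres (P := pvLB A B C n) (pvBodyF A B C n m) (List.range n) dp ?_ hLB
    intro d i hi hLBd
    have hin : i < n := List.mem_range.mp hi
    unfold pvBodyF
    split
    · exact hLBd
    · next hbit =>
      have hbit' : m.testBit i = false := by simpa using hbit
      have hd1 : pvLB A B C n (pvUpd d (m ||| 1 <<< i)
          (pvOmin (d (m ||| 1 <<< i)) (pvOadd (d m) (pvCost A B i)))) :=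
        pvLB_upd hLBd _ (pvCand_LB hLBd (pvG_R1 hin hbit'))
      refine pvFoldl_pres (P := pvLB A B C n) (pvPairBodyF A B C m i) _ _ ?_ hd1
      intro d2 j hj hLB2
      have hjm : i + 1 ≤ j ∧ j < n := by
        have := List.mem_range'_1.mp hj
        omega
      unfold pvPairBodyF
      split
      · exact hLB2
      · next hbitj =>
        have hbitj' : m.testBit j = false := by simpa using hbitj
        exact pvLB_upd hLB2 _ (pvCand_LB hLB2 (pvG_R2 (by omega) hjm.2 hbit' hbitj'))
  -- whole inner loop only decreases dp
  have hmono : pvPLE ((List.range n).foldl (pvBodyF A B C n m) dp) dp :=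
    pvFoldl_ple _ (pvBodyF_mono A B C n m) _ _
  -- pushes for mask m are established
  have hest : ∀ i ∈ List.range n,
      (fun (i : Nat) (d : Nat → Option Int) =>
        (m.testBit i = false → pvUB (d (m ||| 1 <<< i)) (pvG A B C n m + pvCost A B i)) ∧
        (∀ j, i < j → j < n → m.testBit i = false → m.testBit j = false →
          pvUB (d (m ||| 1 <<< i ||| 1 <<< j))
            (pvG A B C n m + (C + (pvCost A B i + pvCost A B j))))) i
      ((List.range n).foldl (pvBodyF A B C n m) dp) := by
    intro i hi
    refine pvFoldl_estab (pvBodyF A B C n m)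
      (I := fun d => d m = some (pvG A B C n m))
      (P := fun (i : Nat) (d : Nat → Option Int) =>
        (m.testBit i = false → pvUB (d (m ||| 1 <<< i)) (pvG A B C n m + pvCost A B i)) ∧
        (∀ j, i < j → j < n → m.testBit i = false → m.testBit j = false →
          pvUB (d (m ||| 1 <<< i ||| 1 <<< j))
            (pvG A B C n m + (C + (pvCost A B i + pvCost A B j)))))
      (hmono := pvBodyF_mono A B C n m)
      (hdc := ?_) (List.range n) dp ?_ ?_ hdm i hi
    · intro x d1 d2 hle hP
      exact ⟨fun hb => pvUB_of_PLE hle (hP.1 hb),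
        fun j h1 h2 h3 h4 => pvUB_of_PLE hle (hP.2 j h1 h2 h3 h4)⟩
    · intro d x _ hd
      show pvBodyF A B C n m d x m = some (pvG A B C n m)
      rw [pvBodyF_keep d x m (Or.inr rfl)]
      exact hd
    · -- establishment by the body for index x
      intro d x _ hd
      unfold pvBodyF
      split
      · next hbit =>
        refine ⟨fun hb => ?_, fun j _ _ hb _ => ?_⟩ <;> rw [hbit] at hb <;> cases hb
      · next hbit =>
        have hbit' : m.testBit x = false := by simpa using hbit
        have hd1single : pvUB ((pvUpd d (m ||| 1 <<< x)
            (pvOmin (d (m ||| 1 <<< x)) (pvOadd (d m) (pvCost A B x)))) (m ||| 1 <<< x))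
            (pvG A B C n m + pvCost A B x) := by
          rw [pvUpd_apply_self, hd]
          exact pvUB_omin_right (le_refl _)
        have hd1m : (pvUpd d (m ||| 1 <<< x)
            (pvOmin (d (m ||| 1 <<< x)) (pvOadd (d m) (pvCost A B x)))) m
            = some (pvG A B C n m) := by
          rw [pvUpd_apply_ne _ (Ne.symm (pvTgt_ne_mask hbit'))]
          exact hd
        constructor
        · intro _
          exact pvUB_of_PLE (pvFoldl_ple _ (pvPairBodyF_mono A B C m x) _ _) hd1single
        · intro j hxj hjn _ hbj
          have hjmem : j ∈ List.range' (x + 1) (n - (x + 1)) := by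
            rw [List.mem_range'_1]
            omega
          have := pvFoldl_estab (pvPairBodyF A B C m x)
            (I := fun d2 => d2 m = some (pvG A B C n m))
            (P := fun (j : Nat) (d2 : Nat → Option Int) =>
              m.testBit j = false →
                pvUB (d2 (m ||| 1 <<< x ||| 1 <<< j))
                  (pvG A B C n m + (C + (pvCost A B x + pvCost A B j))))
            (hmono := pvPairBodyF_mono A B C m x)
            (hdc := fun z d1 d2 hle hP hz => pvUB_of_PLE hle (hP hz))
            (List.range' (x + 1) (n - (x + 1))) _
            (fun d2 z _ hd2 => by
              show pvPairBodyF A B C m x d2 z m = some (pvG A B C n m)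
              rw [pvPairBodyF_keep hbit' d2 z m (Or.inr rfl)]; exact hd2)
            ?_ hd1m j hjmem
          · exact this hbj
          · intro d2 z _ hd2 hbz
            unfold pvPairBodyF
            rw [if_neg (by rw [hbz]; exact Bool.false_ne_true)]
            rw [pvUpd_apply_self, hd2]
            exact pvUB_omin_right (le_refl _)
  -- assemble the invariant for m+1
  refine ⟨by rw [hkeep 0 (Or.inl rfl)]; exact h0, hLB', ?_⟩
  intro p hp
  by_cases hpm : p = m
  · subst hpm
    constructor
    · intro i hin hbit
      have := (hest i (List.mem_range.mpr hin)).1 hbit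
      exact this
    · intro i j hij hjn hbi hbj
      exact (hest i (List.mem_range.mpr (lt_trans hij hjn))).2 j hij hjn hbi hbj
  · have hpm' : p < m := by omega
    obtain ⟨hp1, hp2⟩ := hPush p hpm'
    constructor
    · intro i hin hbit
      exact pvUB_of_PLE hmono (hp1 i hin hbit)
    · intro i j hij hjn hbi hbj
      exact pvUB_of_PLE hmono (hp2 i j hij hjn hbi hbj)

lemma pvRun {A B : List Int} {C : Int} {n : Nat} :
    ∀ (k a : Nat) (dp : Nat → Option Int), a + k ≤ 2 ^ n → pvInv A B C n a dp →
      pvInv A B C n (a + k)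
        ((List.range' a k).foldl (fun dp mask => (List.range n).foldl (pvBodyF A B C n mask) dp) dp) := by
  intro k
  induction k with
  | zero => intro a dp _ h; simpa using h
  | succ k ih =>
    intro a dp hle h
    rw [List.range'_succ, List.foldl_cons]
    have h1 := pvStep (A := A) (B := B) (C := C) (by omega) h
    have := ih (a + 1) _ (by omega) h1
    have hco : a + 1 + k = a + (k + 1) := by omega
    rwa [hco] at this

-- the closed forms of the two sides
lemma pvFoldl_sum (A B : List Int) :
    ∀ (n : Nat) (s : Int),
      (List.range n).foldl
        (fun (s : Int) (i : Nat) => s + |PySem.List.pyGetD A (i : Int) 0 - PySem.List.pyGetD B (i : Int) 0|) s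
        = s + ∑ j ∈ Finset.range n, pvCost A B j := by
  intro n
  induction n with
  | zero => intro s; simp
  | succ k ih =>
    intro s
    rw [List.range_succ, List.foldl_append, Finset.sum_range_succ, ih]
    simp [pvCost]
    ring

lemma pvG_full (A B : List Int) (C : Int) (n : Nat) :
    pvG A B C n (2 ^ n - 1) = (∑ j ∈ Finset.range n, pvCost A B j) + min 0 C * ((n / 2 : Nat) : Int) := by
  have hS : pvS n (2 ^ n - 1) = Finset.range n := by
    unfold pvS
    ext j
    simp only [Finset.mem_filter, Finset.mem_range, Nat.testBit_two_pow_sub_one]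
    constructor
    · rintro ⟨h, _⟩; exact h
    · intro h; exact ⟨h, by simp [h]⟩
  unfold pvG
  rw [hS, Finset.card_range]

-- ---- the list dp of the port viewed as a total map agrees with the function-level loops ----
lemma pvView_set {dp : List (Option Int)} {k : Nat} (v : Option Int) (hk : k < dp.length) :
    (fun t => (dp.set k v).getD t none) = pvUpd (fun t => dp.getD t none) k v := by
  funext t
  simp only [List.getD_eq_getElem?_getD, List.getElem?_set, pvUpd]
  by_cases h : k = t
  · subst h
    simp [hk]
  · rw [if_neg h, if_neg (fun ht : t = k => h ht.symm)]

lemma pvFoldl_comm {α : Type} (g : List (Option Int) → α → List (Option Int))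
    (f : (Nat → Option Int) → α → (Nat → Option Int)) (L : Nat) :
    ∀ (l : List α) (dp : List (Option Int)),
      (∀ (dp' : List (Option Int)) (x : α), x ∈ l → dp'.length = L →
        (g dp' x).length = L ∧
        (fun t => (g dp' x).getD t none) = f (fun t => dp'.getD t none) x) →
      dp.length = L →
      (l.foldl g dp).length = L ∧
      (fun t => (l.foldl g dp).getD t none) = l.foldl f (fun t => dp.getD t none) := by
  intro l
  induction l with
  | nil => intro dp _ h; exact ⟨h, rfl⟩
  | cons x xs ih =>
    intro dp hstep hlen
    obtain ⟨h1, h2⟩ := hstep dp x (by simp) hlen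
    rw [List.foldl_cons, List.foldl_cons, ← h2]
    exact ih (g dp x) (fun d y hy hl => hstep d y (List.mem_cons_of_mem x hy) hl) h1

lemma pvPow_lt {i n : Nat} (hi : i < n) : (1 <<< i : Nat) < 2 ^ n := by
  rw [Nat.one_shiftLeft]
  exact Nat.pow_lt_pow_right one_lt_two hi

lemma pvPair_comm {A B : List Int} {C : Int} {n mask i : Nat} (hmask : mask < 2 ^ n) (hi : i < n)
    (dp : List (Option Int)) (j : Nat) (hj : j < n) (hlen : dp.length = 2 ^ n) :
    (pvPairBody A B C mask i dp j).length = 2 ^ n ∧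
    (fun t => (pvPairBody A B C mask i dp j).getD t none)
      = pvPairBodyF A B C mask i (fun t => dp.getD t none) j := by
  have hkey : mask ||| 1 <<< i ||| 1 <<< j < 2 ^ n :=
    Nat.or_lt_two_pow (Nat.or_lt_two_pow hmask (pvPow_lt hi)) (pvPow_lt hj)
  unfold pvPairBody pvPairBodyF
  by_cases hb : mask.testBit j
  · simp only [hb, if_true]
    exact ⟨hlen, trivial⟩
  · rw [if_neg hb, if_neg hb]
    exact ⟨by rw [List.length_set, hlen], pvView_set _ (by rw [hlen]; exact hkey)⟩

lemma pvInner_comm {A B : List Int} {C : Int} {n mask : Nat} (hmask : mask < 2 ^ n)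
    (dp : List (Option Int)) (i : Nat) (hi : i < n) (hlen : dp.length = 2 ^ n) :
    (pvBody A B C n mask dp i).length = 2 ^ n ∧
    (fun t => (pvBody A B C n mask dp i).getD t none)
      = pvBodyF A B C n mask (fun t => dp.getD t none) i := by
  unfold pvBody pvBodyF
  by_cases hb : mask.testBit i
  · simp only [hb, if_true]
    exact ⟨hlen, trivial⟩
  · rw [if_neg hb, if_neg hb]
    have hkey : mask ||| 1 <<< i < 2 ^ n := Nat.or_lt_two_pow hmask (pvPow_lt hi)
    have hset : (fun t => (dp.set (mask ||| 1 <<< i)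
        (pvOmin (dp.getD (mask ||| 1 <<< i) none) (pvOadd (dp.getD mask none) (pvCost A B i)))).getD t none)
        = pvUpd (fun t => dp.getD t none) (mask ||| 1 <<< i)
            (pvOmin (dp.getD (mask ||| 1 <<< i) none) (pvOadd (dp.getD mask none) (pvCost A B i))) :=
      pvView_set _ (by rw [hlen]; exact hkey)
    have hcomm := pvFoldl_comm (pvPairBody A B C mask i) (pvPairBodyF A B C mask i) (2 ^ n)
      (List.range' (i + 1) (n - (i + 1)))
      (dp.set (mask ||| 1 <<< i)
        (pvOmin (dp.getD (mask ||| 1 <<< i) none) (pvOadd (dp.getD mask none) (pvCost A B i))))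
      (fun d j hj hl => pvPair_comm hmask hi d j
        (by have := List.mem_range'_1.mp hj; omega) hl)
      (by rw [List.length_set, hlen])
    refine ⟨hcomm.1, ?_⟩
    rw [hcomm.2, hset]

lemma pvView_init (n : Nat) :
    (fun t => ((List.replicate (2 ^ n) (none : Option Int)).set 0 (some 0)).getD t none)
      = (fun t => if t = 0 then some 0 else none) := by
  funext t
  simp only [List.getD_eq_getElem?_getD, List.getElem?_set, List.length_replicate,
    List.getElem?_replicate]
  by_cases h : t = 0
  · subst h
    simp [Nat.two_pow_pos n]
  · rw [if_neg (fun h0 : (0 : Nat) = t => h h0.symm), if_neg h]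
    split <;> rfl

-- ===== VERDICT (by name: the statement is the Claim_ definition above) =====
theorem min_cost_to_equalize_spec : Claim_equal_min_cost_to_equalize := by
  intro A B C N _ hpre
  obtain ⟨hN, _, _⟩ := hpre
  unfold Spec_min_cost_to_equalize min_cost_to_equalize min_cost_to_equalize_alt
  set n := N.toNat with hn
  -- commute the list-level fold of the port to the function-level fold
  have houter := pvFoldl_comm
    (fun dp mask => (List.range n).foldl (pvBody A B C n mask) dp)
    (fun dp mask => (List.range n).foldl (pvBodyF A B C n mask) dp) (2 ^ n)
    (List.range (2 ^ n))
    ((List.replicate (2 ^ n) (none : Option Int)).set 0 (some 0))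
    (fun d mask hmask hl => by
      have hmlt : mask < 2 ^ n := List.mem_range.mp hmask
      exact pvFoldl_comm (pvBody A B C n mask) (pvBodyF A B C n mask) (2 ^ n)
        (List.range n) d
        (fun d2 i hi hl2 => pvInner_comm hmlt d2 i (List.mem_range.mp hi) hl2) hl)
    (by rw [List.length_set, List.length_replicate])
  have hview := houter.2
  rw [pvView_init n] at hview
  have hgetD : ((List.range (2 ^ n)).foldl
        (fun dp mask => (List.range n).foldl (pvBody A B C n mask) dp)
        ((List.replicate (2 ^ n) (none : Option Int)).set 0 (some 0))).getD (2 ^ n - 1) none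
      = ((List.range (2 ^ n)).foldl
          (fun dp mask => (List.range n).foldl (pvBodyF A B C n mask) dp)
          (fun t => if t = 0 then some 0 else none)) (2 ^ n - 1) :=
    congrFun hview (2 ^ n - 1)
  rw [hgetD]
  -- now run the DP invariant on the function-level fold
  have hinv0 : pvInv A B C n 0 (fun t => if t = 0 then some 0 else none) := by
    refine ⟨rfl, ?_, ?_⟩
    · intro t w hw
      by_cases ht : t = 0
      · subst ht
        simp at hw
        rw [pvG_zero, ← hw]
      · simp [ht] at hw
    · intro p hp; omega
  have hrun := pvRun (A := A) (B := B) (C := C) (n := n) (2 ^ n) 0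
    (fun t => if t = 0 then some 0 else none) (by omega) hinv0
  rw [← List.range_eq_range'] at hrun
  simp only [Nat.zero_add] at hrun
  have hfin : (2 ^ n - 1) < 2 ^ n := by
    have : 0 < 2 ^ n := Nat.two_pow_pos n
    omega
  have hval := pvDp_eq_of_inv hrun (2 ^ n - 1) hfin (by omega)
  rw [hval]
  simp only [Option.getD_some]
  rw [pvG_full, pvFoldl_sum]
  have hdiv : PySem.Int.floordiv N 2 = ((n / 2 : Nat) : Int) := by
    have hcast : N = ((n : Nat) : Int) := by omega
    rw [hcast]
    exact_mod_cast PySem.Int.floordiv_natCast n 2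
  rw [hdiv]
  ring
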